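-- pv_equiv track=rewrite | github.com/thirupathireddy665/crossbeam | src_training/bustle_generated_properties.py | is_short_string
-- ===== SOURCE A (Python) =====
-- AllTrue = -1
--
-- Mixed = 0
--
-- AllFalse = 1
--
-- def is_short_string(inputs):
--     is_true_present = False
--     is_false_present = False
--     for program_input in inputs:
--         if len(program_input.strip()) <= 5:
--             is_true_present = True
--         else:
--             is_false_present = True
--
--     if is_true_present and is_false_present:
--         return Mixed
--     elif is_true_present:
--         return AllTrue
--     else:
--         return AllFalse
-- ===== SOURCE B (Python) =====
-- AllTrue = -1
--
-- Mixed = 0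
--
-- AllFalse = 1
--
-- def is_short_string(inputs):
--     if not inputs:
--         return AllFalse
--     lengths = [len(p.strip()) for p in inputs]
--     if max(lengths) <= 5:
--         return AllTrue
--     if min(lengths) > 5:
--         return AllFalse
--     return Mixed
-- ===== Notes on version B (the rewrite author's own statement) =====
-- stated objective: alternative
-- what changed: Instead of classifying every element with two presence flags, B computes the min and max of the stripped lengths and decides by comparing those two extremes with the threshold 5 (max<=5: all short; min>5: all long; otherwise mixed).
import Mathlib
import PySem

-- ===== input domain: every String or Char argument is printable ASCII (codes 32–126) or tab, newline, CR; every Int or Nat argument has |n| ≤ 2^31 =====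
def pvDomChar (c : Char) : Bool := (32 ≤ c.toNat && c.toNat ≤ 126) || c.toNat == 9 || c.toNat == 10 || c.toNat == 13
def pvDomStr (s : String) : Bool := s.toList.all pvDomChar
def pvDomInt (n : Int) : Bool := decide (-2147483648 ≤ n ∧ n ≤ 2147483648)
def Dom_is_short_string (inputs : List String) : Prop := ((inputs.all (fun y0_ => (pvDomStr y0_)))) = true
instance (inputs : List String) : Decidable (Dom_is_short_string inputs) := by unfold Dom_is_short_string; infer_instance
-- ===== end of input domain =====

-- B decides from the min and max of the stripped lengths compared against the
-- threshold 5, instead of A's per-element two-flag classification (alternative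
-- algorithm, same cost).


-- ===== PORT A =====
def is_short_string (inputs : List String) : Int :=
  let st := inputs.foldl
    (fun (s : Bool × Bool) program_input =>
      if PySem.Str.len (PySem.Str.strip program_input) ≤ 5 then (true, s.2) else (s.1, true))
    (false, false)
  if st.1 && st.2 then 0
  else if st.1 then -1
  else 1

-- ===== PORT B =====
def is_short_string_alt (inputs : List String) : Int :=
  if inputs = [] then 1
  else
    let lengths := inputs.map (fun p => PySem.Str.len (PySem.Str.strip p))
    match PySem.List.max? lengths (fun x => x), PySem.List.min? lengths (fun x => x) with
    | some M, some m => if M ≤ 5 then -1 else if m > 5 then 1 else 0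
    | _, _ => 1  -- unreachable: lengths is nonempty here, so max?/min? are some

-- ===== PRECONDITION & SPEC =====
def Spec_is_short_string (inputs : List String) (out : Int) : Prop := out = is_short_string_alt inputs
instance (inputs : List String) (out : Int) : Decidable (Spec_is_short_string inputs out) := by unfold Spec_is_short_string; infer_instance

-- ===== CLAIM (what is proved, stated in full; the proofs are below) =====
def Claim_equal_is_short_string : Prop := ∀ (inputs : List String), Dom_is_short_string inputs → Spec_is_short_string inputs (is_short_string inputs)

-- ===== LEMMAS AND PROOFS =====

-- shorthand used only in the proofs
def pvLen (p : String) : Int := PySem.Str.len (PySem.Str.strip p)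

-- A's loop state: each flag is the OR of its initial value with "some element is (not) short"
theorem pv_fold_flags (inputs : List String) (t f : Bool) :
    inputs.foldl
      (fun (s : Bool × Bool) program_input =>
        if PySem.Str.len (PySem.Str.strip program_input) ≤ 5 then (true, s.2) else (s.1, true))
      (t, f)
    = (t || inputs.any (fun p => pvLen p ≤ 5), f || inputs.any (fun p => ¬ pvLen p ≤ 5)) := by
  induction inputs generalizing t f with
  | nil => simp
  | cons x xs ih =>
    by_cases h : PySem.Str.len (PySem.Str.strip x) ≤ 5
    · rw [List.foldl_cons, if_pos h, ih]
      have h' : (PySem.Chars.strip x.toList).length ≤ 5 := by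
        simpa [PySem.Str.len, PySem.Str.strip] using h
      have h2 : ¬ 5 < (PySem.Chars.strip x.toList).length := not_lt.mpr h'
      simp [pvLen, h', h2]
    · rw [List.foldl_cons, if_neg h, ih]
      have h' : ¬ (PySem.Chars.strip x.toList).length ≤ 5 := by
        simpa [PySem.Str.len, PySem.Str.strip] using h
      have h2 : 5 < (PySem.Chars.strip x.toList).length := not_le.mp h'
      simp [pvLen, h', h2]

-- ===== VERDICT (by name: the statement is the Claim_ definition above) =====
theorem is_short_string_spec : Claim_equal_is_short_string := by
  intro inputs _
  show is_short_string inputs = is_short_string_alt inputs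
  cases hne : inputs with
  | nil => simp [is_short_string, is_short_string_alt]
  | cons a as =>
  rw [← hne]
  have hnil : inputs ≠ [] := by simp [hne]
  simp only [is_short_string, is_short_string_alt, pv_fold_flags, Bool.false_or, if_neg hnil]
  set lengths := inputs.map (fun p => PySem.Str.len (PySem.Str.strip p)) with hl
  have hlen : lengths ≠ [] := by simp [hl, hne]
  obtain ⟨M, hM⟩ : ∃ M, PySem.List.max? lengths (fun x => x) = some M := by
    cases hx : PySem.List.max? lengths (fun x => x) with
    | none => exact absurd ((PySem.List.max?_eq_none_iff lengths _).mp hx) hlen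
    | some M => exact ⟨M, rfl⟩
  obtain ⟨m, hm⟩ : ∃ m, PySem.List.min? lengths (fun x => x) = some m := by
    cases hx : PySem.List.min? lengths (fun x => x) with
    | none => exact absurd ((PySem.List.min?_eq_none_iff lengths _).mp hx) hlen
    | some m => exact ⟨m, rfl⟩
  have hMmem := PySem.List.max?_mem hM
  have hmmem := PySem.List.min?_mem hm
  have hMmax := PySem.List.max?_isMax hM
  have hmmin := PySem.List.min?_isMin hm
  rw [hM, hm]
  -- translate membership in lengths to `any` over inputs
  have hanyS : (inputs.any (fun p => pvLen p ≤ 5)) = true ↔ ∃ x ∈ lengths, x ≤ 5 := by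
    simp [hl, pvLen, List.any_eq_true]
  have hanyL : (inputs.any (fun p => ¬ pvLen p ≤ 5)) = true ↔ ∃ x ∈ lengths, ¬ x ≤ 5 := by
    simp [hl, pvLen, List.any_eq_true]
  by_cases hM5 : M ≤ 5
  · -- all short
    have hallS : (inputs.any (fun p => pvLen p ≤ 5)) = true :=
      hanyS.mpr ⟨M, hMmem, hM5⟩
    have hnoL : (inputs.any (fun p => ¬ pvLen p ≤ 5)) = false := by
      by_contra h
      obtain ⟨x, hx, hx5⟩ := hanyL.mp (by simpa using h)
      exact hx5 (le_trans (hMmax x hx) hM5)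
    simp only [hallS, hnoL, Bool.and_false, if_false, if_true, Bool.false_eq_true]
    simp [hM5]
  · by_cases hm5 : 5 < m
    · -- all long
      have hnoS : (inputs.any (fun p => pvLen p ≤ 5)) = false := by
        by_contra h
        obtain ⟨x, hx, hx5⟩ := hanyS.mp (by simpa using h)
        exact absurd (lt_of_lt_of_le hm5 (hmmin x hx)) (not_lt.mpr hx5)
      simp only [hnoS, Bool.false_and, if_false, Bool.false_eq_true]
      simp [hM5, hm5]
    · -- mixed
      have hS : (inputs.any (fun p => pvLen p ≤ 5)) = true :=
        hanyS.mpr ⟨m, hmmem, not_lt.mp hm5⟩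
      have hL : (inputs.any (fun p => ¬ pvLen p ≤ 5)) = true :=
        hanyL.mpr ⟨M, hMmem, hM5⟩
      simp only [hS, hL, Bool.and_self, if_true]
      simp [hM5, hm5]
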